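-- pv_equiv track=rewrite | github.com/Wang-Xiaodong1899/SVD | scripts/text_to_video/low2cmd_pipe.py | determine_turns
-- ===== SOURCE A (Python) =====
-- def determine_turns(left_signals, right_signals):
--     turns = []
--     last_turn = None
--
--     for i in range(len(left_signals)):
--         current_turn = None
--         if left_signals[i] == 1:
--             current_turn = "turn left"
--         elif right_signals[i] == 1:
--             current_turn = "turn right"
--
--         if current_turn and current_turn != last_turn:
--             turns.append(f"{current_turn}")
--             last_turn = current_turn
--
--     if not turns:
--         return [] # others
--     return turns
-- ===== SOURCE B (Python) =====
-- def _dedup(xs):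
--     if len(xs) < 2:
--         return list(xs)
--     if xs[0] == xs[1]:
--         return _dedup(xs[1:])
--     return [xs[0]] + _dedup(xs[1:])
--
--
-- def determine_turns(left_signals, right_signals):
--     labels = []
--     for i, l in enumerate(left_signals):
--         if l == 1:
--             labels.append("turn left")
--         elif right_signals[i] == 1:
--             labels.append("turn right")
--     return _dedup(labels)
-- ===== Notes on version B (the rewrite author's own statement) =====
-- stated objective: simpler
-- what changed: Replaces the single stateful loop carrying (turns, last_turn) by two separated passes: first extract the flat list of signal labels, then collapse consecutive duplicate labels with a recursive run-length dedup; the final empty-check disappears.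
import Mathlib
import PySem

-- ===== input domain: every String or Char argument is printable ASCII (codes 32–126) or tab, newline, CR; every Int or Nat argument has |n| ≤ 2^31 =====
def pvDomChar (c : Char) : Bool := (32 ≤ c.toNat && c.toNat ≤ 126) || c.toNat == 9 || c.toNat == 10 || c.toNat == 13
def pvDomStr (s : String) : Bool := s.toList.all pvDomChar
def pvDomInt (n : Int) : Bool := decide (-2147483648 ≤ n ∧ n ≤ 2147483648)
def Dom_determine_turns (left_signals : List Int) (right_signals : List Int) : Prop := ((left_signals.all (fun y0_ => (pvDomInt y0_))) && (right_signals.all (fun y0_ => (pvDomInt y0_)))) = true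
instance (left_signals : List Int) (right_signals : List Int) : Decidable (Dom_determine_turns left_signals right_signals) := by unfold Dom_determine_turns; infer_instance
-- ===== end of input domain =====

-- B separates A's single stateful loop into label extraction followed by a recursive
-- collapse of consecutive duplicate labels (objective: simpler). Pre_ excludes only the
-- inputs on which Python A raises IndexError (right_signals too short at a needed index).


-- ===== PORT A =====
-- A's for-loop over range(len(left_signals)) with state (turns, last_turn), as index recursion.
-- (right_signals[i] is pyGetD: in range under Pre_, where Python does not raise.)
def goA (l r : List Int) (i : Nat) (turns : List String) (last : Option String) : List String :=
  if _h : i < l.length then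
    let cur : Option String :=
      if PySem.List.pyGetD l (i : Int) 0 == 1 then some "turn left"
      else if PySem.List.pyGetD r (i : Int) 0 == 1 then some "turn right"
      else none
    match cur with
    | some c => if some c ≠ last then goA l r (i+1) (turns ++ [c]) (some c)
                else goA l r (i+1) turns last
    | none => goA l r (i+1) turns last
  else turns
termination_by l.length - i

def determine_turns (left_signals : List Int) (right_signals : List Int) : List String :=
  let turns := goA left_signals right_signals 0 [] none
  if turns = [] then [] else turns

-- ===== PORT B =====
-- Source B's label-building loop (one cons per index), the recursive _dedup.
def pvLabels (r : List Int) : List Int → Nat → List String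
  | [], _ => []
  | l :: t, i =>
    if l == 1 then "turn left" :: pvLabels r t (i+1)
    else if PySem.List.pyGetD r (i : Int) 0 == 1 then "turn right" :: pvLabels r t (i+1)
    else pvLabels r t (i+1)

def pvDedup : List String → List String
  | [] => []
  | [x] => [x]
  | x :: y :: t => if x == y then pvDedup (y :: t) else x :: pvDedup (y :: t)

def determine_turns_alt (left_signals : List Int) (right_signals : List Int) : List String :=
  pvDedup (pvLabels right_signals left_signals 0)

-- ===== PRECONDITION & SPEC =====
-- Pre_ excludes exactly the inputs on which Python A raises IndexError: some index i of
-- left_signals with left_signals[i] != 1 and i >= len(right_signals). (Python B raises there too.)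
def Pre_determine_turns (left_signals : List Int) (right_signals : List Int) : Prop :=
  ∀ i, i < left_signals.length → (left_signals.getD i 0 = 1 ∨ i < right_signals.length)
instance (left_signals : List Int) (right_signals : List Int) : Decidable (Pre_determine_turns left_signals right_signals) := by unfold Pre_determine_turns; infer_instance

def pvWitness_determine_turns : List Int × List Int := ([1, 0, 0, 1], [0, 1, 1, 0])

def Spec_determine_turns (left_signals : List Int) (right_signals : List Int) (out : List String) : Prop := out = determine_turns_alt left_signals right_signals
instance (left_signals : List Int) (right_signals : List Int) (out : List String) : Decidable (Spec_determine_turns left_signals right_signals out) := by unfold Spec_determine_turns; infer_instance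

-- ===== CLAIM (what is proved, stated in full; the proofs are below) =====
def Claim_equal_determine_turns : Prop := ∀ (left_signals : List Int) (right_signals : List Int), Dom_determine_turns left_signals right_signals → Pre_determine_turns left_signals right_signals → Spec_determine_turns left_signals right_signals (determine_turns left_signals right_signals)

-- ===== LEMMAS AND PROOFS =====

-- "dedup remembering the last emitted label": the state A's guard maintains.
def pvStrip : List String → Option String → List String
  | [], _ => []
  | x :: t, last => if some x = last then pvStrip t last else x :: pvStrip t (some x)

theorem pvDedup_cons_eq_strip (xs : List String) (x : String) :
    pvDedup (x :: xs) = x :: pvStrip xs (some x) := by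
  induction xs generalizing x with
  | nil => simp [pvDedup, pvStrip]
  | cons y t ih =>
    by_cases h : y = x
    · subst h
      simp [pvDedup, pvStrip, ih]
    · simp [pvDedup, pvStrip, h, Ne.symm h, ih]

theorem pvDedup_eq_strip (xs : List String) : pvDedup xs = pvStrip xs none := by
  cases xs with
  | nil => rfl
  | cons x t => simp [pvDedup_cons_eq_strip, pvStrip]

theorem goA_eq (l r : List Int) :
    ∀ n i turns last, l.length - i = n →
      goA l r i turns last = turns ++ pvStrip (pvLabels r (l.drop i) i) last := by
  intro n
  induction n with
  | zero =>
    intro i turns last hn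
    have hi : ¬ i < l.length := by omega
    rw [goA]
    simp [hi, List.drop_eq_nil_of_le (by omega : l.length ≤ i), pvLabels, pvStrip]
  | succ k ih =>
    intro i turns last hn
    have hi : i < l.length := by omega
    have hdrop : l.drop i = l[i] :: l.drop (i + 1) := List.drop_eq_getElem_cons hi
    have hgl : PySem.List.pyGetD l (i : Int) 0 = l[i] := by
      rw [PySem.List.pyGetD_natCast]; simp [List.getD, hi]
    rw [goA]
    simp only [hi, dite_true, hdrop, pvLabels, hgl]
    by_cases hL : l[i] = 1
    · simp only [hL, beq_self_eq_true, if_true]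
      by_cases hlast : some "turn left" = last
      · simp only [← hlast, pvStrip, ne_eq, not_true_eq_false, if_false]
        exact ih (i+1) turns (some "turn left") (by omega)
      · simp only [pvStrip, if_neg hlast, ne_eq]
        rw [if_pos hlast,
          ih (i+1) (turns ++ ["turn left"]) (some "turn left") (by omega)]
        simp
    · have hLb : (l[i] == 1) = false := by simp [hL]
      simp only [hLb, if_false, Bool.false_eq_true]
      by_cases hR : PySem.List.pyGetD r (i : Int) 0 = 1
      · simp only [hR, beq_self_eq_true, if_true]
        by_cases hlast : some "turn right" = last
        · simp only [← hlast, pvStrip, ne_eq, not_true_eq_false, if_false]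
          exact ih (i+1) turns (some "turn right") (by omega)
        · simp only [pvStrip, if_neg hlast, ne_eq]
          rw [if_pos hlast,
            ih (i+1) (turns ++ ["turn right"]) (some "turn right") (by omega)]
          simp
      · have hRb : (PySem.List.pyGetD r (i : Int) 0 == 1) = false := by
          simp only [beq_eq_false_iff_ne, ne_eq]; exact hR
        simp only [hRb, if_false, Bool.false_eq_true]
        exact ih (i+1) turns last (by omega)

-- ===== VERDICT (by name: the statement is the Claim_ definition above) =====
theorem determine_turns_spec : Claim_equal_determine_turns := by
  intro l r _dom _pre
  unfold Spec_determine_turns determine_turns determine_turns_alt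
  have h := goA_eq l r (l.length) 0 [] none rfl
  simp only [List.drop_zero, List.nil_append] at h
  dsimp only
  rw [h, pvDedup_eq_strip]
  split <;> simp_all
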